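-- pv_equiv track=rewrite | github.com/zampie/learning | leetcode/36.py | isValidArray
-- ===== SOURCE A (Python) =====
-- def isValidArray(a):
--     lis = []
--     for i in a:
--         if i !='.' and i in lis:
--             return False
--         else:
--             lis.append(i)
--     return True
-- ===== SOURCE B (Python) =====
-- def isValidArray(a):
--     vals = [x for x in a if x != '.']
--     return len(vals) == len(set(vals))
-- ===== Notes on version B (the rewrite author's own statement) =====
-- stated objective: simpler
-- what changed: Replaces the incremental seen-so-far scan with early return by a one-pass filter of the non-'.' values followed by a cardinality comparison len(vals) == len(set(vals)).
import Mathlib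
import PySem

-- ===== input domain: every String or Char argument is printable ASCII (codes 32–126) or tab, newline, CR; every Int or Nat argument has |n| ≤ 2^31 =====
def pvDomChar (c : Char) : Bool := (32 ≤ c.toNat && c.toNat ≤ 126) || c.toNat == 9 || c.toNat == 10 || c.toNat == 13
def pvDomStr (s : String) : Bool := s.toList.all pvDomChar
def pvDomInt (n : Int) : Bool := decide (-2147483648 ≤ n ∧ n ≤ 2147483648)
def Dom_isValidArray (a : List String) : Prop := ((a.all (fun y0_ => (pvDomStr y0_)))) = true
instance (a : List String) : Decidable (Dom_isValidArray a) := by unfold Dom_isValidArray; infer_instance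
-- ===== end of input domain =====

-- B replaces A's incremental seen-so-far scan (early return on a repeat) by filtering out '.'
-- and comparing the list's length with its set's cardinality (objective: simpler; no speed claim).
-- ===== PORT A =====
def isValidArrayGo (lis : List String) : List String → Bool
  | [] => true
  | i :: rest =>
    if i ≠ "." ∧ lis.contains i then false
    else isValidArrayGo (lis ++ [i]) rest

def isValidArray (a : List String) : Bool := isValidArrayGo [] a

-- ===== PORT B =====
def isValidArray_alt (a : List String) : Bool :=
  let vals := a.filter (fun x => x ≠ ".")
  vals.length == (PySem.Set.ofList vals).length

-- ===== PRECONDITION & SPEC =====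
def Spec_isValidArray (a : List String) (out : Bool) : Prop := out = isValidArray_alt a
instance (a : List String) (out : Bool) : Decidable (Spec_isValidArray a out) := by unfold Spec_isValidArray; infer_instance

-- ===== CLAIM (what is proved, stated in full; the proofs are below) =====
def Claim_equal_isValidArray : Prop := ∀ (a : List String), Dom_isValidArray a → Spec_isValidArray a (isValidArray a)

-- ===== LEMMAS AND PROOFS =====

-- set(vals) has the same members as vals.dedup and both are Nodup, so they are a permutation;
-- length equality with vals then characterises Nodup of vals.
theorem pvLen_ofList_eq_iff (xs : List String) :
    (xs.length = (PySem.Set.ofList xs).length) ↔ xs.Nodup := by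
  have hperm : (PySem.Set.ofList xs).Perm xs.dedup :=
    (List.perm_ext_iff_of_nodup (PySem.Set.nodup_ofList xs) xs.nodup_dedup).2
      (fun x => by rw [PySem.Set.mem_ofList, List.mem_dedup])
  constructor
  · intro h
    have hlen : xs.dedup.length = xs.length := by rw [← hperm.length_eq, ← h]
    have := xs.dedup_sublist.eq_of_length hlen
    rwa [List.dedup_eq_self] at this
  · intro h
    rw [PySem.Set.ofList_eq_self_of_nodup _ h]

-- Loop invariant for A: the scan returns true iff the '.'-free parts of the seen
-- prefix and the remainder are jointly duplicate-free.
theorem pvGo_eq (rest : List String) : ∀ (lis : List String),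
    (lis.filter (fun x => decide (x ≠ "."))).Nodup →
    isValidArrayGo lis rest
      = decide ((lis.filter (fun x => decide (x ≠ ".")) ++ rest.filter (fun x => decide (x ≠ "."))).Nodup) := by
  induction rest with
  | nil =>
    intro lis h
    rw [isValidArrayGo, List.filter_nil, List.append_nil]
    exact (decide_eq_true h).symm
  | cons i rest ih =>
    intro lis h
    by_cases hi : i = "."
    · have hf : (lis ++ ["."]).filter (fun x => decide (x ≠ ".")) = lis.filter (fun x => decide (x ≠ ".")) := by
        rw [List.filter_append]; simp
      have hc : ("." :: rest).filter (fun x => decide (x ≠ ".")) = rest.filter (fun x => decide (x ≠ ".")) := by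
        simp
      subst hi
      rw [isValidArrayGo, if_neg (fun hcon => hcon.1 rfl), ih (lis ++ ["."]) (hf ▸ h), hf, hc]
    · have hc : (i :: rest).filter (fun x => decide (x ≠ ".")) = i :: rest.filter (fun x => decide (x ≠ ".")) := by
        simp [hi]
      by_cases hmem : i ∈ lis
      · have hcond : i ≠ "." ∧ lis.contains i := ⟨hi, by simpa using hmem⟩
        have hno : ¬ ((lis.filter (fun x => decide (x ≠ ".")) ++ (i :: rest).filter (fun x => decide (x ≠ "."))).Nodup) := by
          intro hnd
          rw [hc, List.nodup_append] at hnd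
          exact hnd.2.2 i (List.mem_filter.2 ⟨hmem, by simp [hi]⟩) i List.mem_cons_self rfl
        rw [isValidArrayGo, if_pos hcond]
        exact (decide_eq_false hno).symm
      · have hf : (lis ++ [i]).filter (fun x => decide (x ≠ ".")) = lis.filter (fun x => decide (x ≠ ".")) ++ [i] := by
          rw [List.filter_append]; simp [hi]
        have hnd : ((lis ++ [i]).filter (fun x => decide (x ≠ "."))).Nodup := by
          rw [hf]
          refine List.Nodup.append h (List.nodup_singleton i) ?_
          intro x hx hx1
          rcases List.mem_singleton.1 hx1 with rfl
          exact hmem (List.mem_filter.1 hx).1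
        have hcond : ¬ (i ≠ "." ∧ lis.contains i) := fun hcon => hmem (by simpa using hcon.2)
        rw [isValidArrayGo, if_neg hcond, ih (lis ++ [i]) hnd, hf, List.append_assoc,
          List.singleton_append, hc]

-- ===== VERDICT (by name: the statement is the Claim_ definition above) =====
theorem isValidArray_spec : Claim_equal_isValidArray := by
  intro a _
  unfold Spec_isValidArray isValidArray isValidArray_alt
  rw [pvGo_eq a [] (by simp)]
  have hlen := pvLen_ofList_eq_iff (a.filter (fun x => decide (x ≠ ".")))
  simp only [ne_eq, decide_not] at hlen ⊢
  by_cases h : (a.filter (fun x => !decide (x = "."))).Nodup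
  · simp [h, hlen.2 h]
  · have hne : ¬ ((a.filter (fun x => !decide (x = "."))).length
        = (PySem.Set.ofList (a.filter (fun x => !decide (x = ".")))).length) :=
      fun hh => h (hlen.1 hh)
    simp [h, hne]
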